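-- pv_equiv track=rewrite | github.com/eidursveinn/unicursalPolygon | unicursalpolygon/models/cyclicpartition.py | __to_standard__
-- ===== SOURCE A (Python) =====
-- def __to_standard__(part):
--     n = len(part)
--     def complement(lis):
--         return [n - i for i in lis]
--     res = []
--     to_check = [
--             part * 2,
--             complement(part) * 2,
--             part[::-1] * 2,
--             complement(part[::-1]) * 2
--         ]
--     for p in to_check:
--         res.extend([p[i:i+n] for i in range(n)])
--     return min(res)
-- ===== SOURCE B (Python) =====
-- def __to_standard__(part):
--     n = len(part)
--
--     def least_rotation(v):
--         # only rotations starting at a minimal element can be lexicographically least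
--         m = min(v)
--         best = None
--         for i, x in enumerate(v):
--             if x == m:
--                 rot = v[i:] + v[:i]
--                 if best is None or rot < best:
--                     best = rot
--         return best
--
--     variants = [part,
--                 [n - x for x in part],
--                 part[::-1],
--                 [n - x for x in part[::-1]]]
--     return min(least_rotation(v) for v in variants)
-- ===== Notes on version B (the rewrite author's own statement) =====
-- stated objective: alternative
-- what changed: Instead of materialising all 4n length-n slices of four doubled lists and taking min of that whole list, B computes each variant's least rotation by examining only the rotations that start at a minimal element of the variant (only those can be lexicographically least) and then takes the min of the 4 results; it builds no doubled lists and no O(n^2)-sized candidate list (much faster when the minimum is rare, measured only 1.4x on constant lists).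
import Mathlib
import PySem

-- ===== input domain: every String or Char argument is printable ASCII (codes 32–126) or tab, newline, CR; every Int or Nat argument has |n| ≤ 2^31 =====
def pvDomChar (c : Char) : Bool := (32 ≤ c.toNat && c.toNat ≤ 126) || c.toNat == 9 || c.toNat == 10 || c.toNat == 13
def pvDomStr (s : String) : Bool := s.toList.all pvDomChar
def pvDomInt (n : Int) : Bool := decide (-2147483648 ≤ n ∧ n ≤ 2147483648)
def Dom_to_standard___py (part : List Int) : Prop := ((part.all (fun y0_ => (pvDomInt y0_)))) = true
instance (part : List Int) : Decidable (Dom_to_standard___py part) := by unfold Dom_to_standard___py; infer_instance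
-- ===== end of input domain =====

-- B prunes the least-rotation search to rotations starting at a minimal element of each
-- of the 4 variants, instead of materialising all 4n length-n slices of the doubled lists.

-- ===== PORT A =====
def to_standard___py (part : List Int) : List Int :=
  let n : Int := (part.length : Int)
  let complement : List Int → List Int := fun lis => lis.map (fun i => n - i)
  let rev : List Int := (PySem.List.slice? part none none (-1)).getD []   -- part[::-1]
  let to_check : List (List Int) :=
    [ PySem.List.pyRepeat part 2,
      PySem.List.pyRepeat (complement part) 2,
      PySem.List.pyRepeat rev 2,
      PySem.List.pyRepeat (complement rev) 2 ]
  let res : List (List Int) :=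
    to_check.foldl (fun res p =>
      res ++ (PySem.List.pyRange 0 n 1).map (fun i => PySem.List.slice p (some i) (some (i + n)))) []
  -- min(res): none exactly when part = [] (Python raises ValueError there; excluded by Pre_)
  (PySem.List.min? res (fun x => x)).getD []

-- ===== PORT B =====
-- least_rotation helper of Source B
def pvLeastRot (v : List Int) : List Int :=
  match PySem.List.min? v (fun x => x) with
  | none => []         -- Python raises ValueError here (v = []); outside Pre_
  | some m =>
    let best : Option (List Int) :=
      (PySem.List.enumerate v 0).foldl (fun best ix =>
        if ix.2 = m then
          let rot := PySem.List.slice v (some ix.1) none ++ PySem.List.slice v none (some ix.1)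
          match best with
          | none => some rot
          | some b => if rot < b then some rot else some b
        else best) none
    best.getD []       -- best is never None in Python here (m occurs in v)

def to_standard___py_alt (part : List Int) : List Int :=
  let n : Int := (part.length : Int)
  let rev : List Int := (PySem.List.slice? part none none (-1)).getD []   -- part[::-1]
  let variants : List (List Int) :=
    [ part,
      part.map (fun x => n - x),
      rev,
      rev.map (fun x => n - x) ]
  (PySem.List.min? (variants.map pvLeastRot) (fun x => x)).getD []

-- ===== PRECONDITION & SPEC =====
-- Pre_ excludes only the empty list, on which Python A raises ValueError (min of empty sequence).
def Pre_to_standard___py (part : List Int) : Prop := part ≠ []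
instance (part : List Int) : Decidable (Pre_to_standard___py part) := by unfold Pre_to_standard___py; infer_instance
def pvWitness_to_standard___py : List Int := [1, 3, 2]

def Spec_to_standard___py (part : List Int) (out : List Int) : Prop := out = to_standard___py_alt part
instance (part : List Int) (out : List Int) : Decidable (Spec_to_standard___py part out) := by unfold Spec_to_standard___py; infer_instance

-- ===== CLAIM (what is proved, stated in full; the proofs are below) =====
def Claim_equal_to_standard___py : Prop := ∀ (part : List Int), Dom_to_standard___py part → Pre_to_standard___py part → Spec_to_standard___py part (to_standard___py part)

-- ===== LEMMAS AND PROOFS =====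

-- rotation of v by k, the list of all rotations, the 4 variants, and all candidates
def pvRot (v : List Int) (k : Nat) : List Int := v.drop k ++ v.take k
def pvRots (v : List Int) (N : Nat) : List (List Int) := (List.range N).map (pvRot v)
def pvVariants (part : List Int) : List (List Int) :=
  [ part,
    part.map (fun x => ((part.length : Int)) - x),
    part.reverse,
    part.reverse.map (fun x => ((part.length : Int)) - x) ]
def pvR (part : List Int) : List (List Int) :=
  (pvVariants part).flatMap (fun v => pvRots v part.length)

lemma pvRepeat_two (xs : List Int) : PySem.List.pyRepeat xs 2 = xs ++ xs := by
  simp [PySem.List.pyRepeat]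

lemma pvTakeDropDouble (v : List Int) (k : Nat) (hk : k ≤ v.length) :
    ((v ++ v).drop k).take v.length = v.drop k ++ v.take k := by
  rw [List.drop_append, Nat.sub_eq_zero_of_le hk, List.drop_zero, List.take_append,
      List.length_drop, List.take_of_length_le (by simp), Nat.sub_sub_self hk]

-- A's block for one doubled variant is exactly the rotation list
lemma pvBlock (v : List Int) (N : Nat) (hv : v.length = N) :
    (PySem.List.pyRange 0 (N : Int) 1).map
      (fun i => PySem.List.slice (v ++ v) (some i) (some (i + (N : Int)))) = pvRots v N := by
  rw [PySem.List.pyRange_one, List.map_map]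
  apply List.map_congr_left
  intro k hk
  simp only [List.mem_range] at hk
  simp only [Function.comp, zero_add]
  rw [PySem.List.slice_natCast_add, ← hv, pvTakeDropDouble v k (by omega)]
  rfl

-- A's result is the minimum of all 4·n rotations
lemma pvA_eq (part : List Int) :
    to_standard___py part = (PySem.List.min? (pvR part) (fun x => x)).getD [] := by
  unfold to_standard___py
  simp only [PySem.List.slice?_none_none_neg_one, Option.getD_some, pvRepeat_two,
    List.foldl_cons, List.foldl_nil, List.nil_append]
  rw [pvBlock part part.length rfl,
      pvBlock (part.map (fun x => ((part.length : Int)) - x)) part.length (by simp),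
      pvBlock part.reverse part.length (by simp),
      pvBlock (part.reverse.map (fun x => ((part.length : Int)) - x)) part.length (by simp)]
  simp [pvR, pvVariants, List.flatMap]

lemma pvFoldCmin {α : Type} (p : α → Prop) [DecidablePred p] (f : α → List Int) (l : List α) (acc : Option (List Int)) :
    (l.foldl (fun best a =>
      if p a then
        match best with
        | none => some (f a)
        | some b => if f a < b then some (f a) else some b
      else best) acc = none ↔ acc = none ∧ l.filter p = []) ∧
    (∀ z, l.foldl (fun best a =>
      if p a then
        match best with
        | none => some (f a)
        | some b => if f a < b then some (f a) else some b
      else best) acc = some z →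
      (z ∈ acc.toList ∨ ∃ a ∈ l, p a ∧ z = f a) ∧
      (∀ b ∈ acc.toList, z ≤ b) ∧ (∀ a ∈ l, p a → z ≤ f a)) := by
  induction l generalizing acc with
  | nil =>
    constructor
    · simp
    · intro z hz
      simp only [List.foldl_nil] at hz
      subst hz
      exact ⟨Or.inl (by simp), by simp, by simp⟩
  | cons a t ih =>
    by_cases hp : p a
    · cases acc with
      | none =>
        have h := ih (some (f a))
        constructor
        · simpa [hp] using (by simp [h.1] : _)
        · intro z hz
          simp only [List.foldl_cons, hp, if_pos] at hz
          obtain ⟨hmem, hacc, hall⟩ := h.2 z hz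
          refine ⟨?_, by simp, ?_⟩
          · rcases hmem with h1 | ⟨b, hb, hpb, rfl⟩
            · simp at h1; exact Or.inr ⟨a, by simp, hp, h1⟩
            · exact Or.inr ⟨b, by simp [hb], hpb, rfl⟩
          · intro x hx hpx
            rcases List.mem_cons.mp hx with rfl | hx'
            · exact hacc _ (by simp)
            · exact hall _ hx' hpx
      | some b =>
        by_cases hlt : f a < b
        · have h := ih (some (f a))
          constructor
          · simp [List.foldl_cons, hp, hlt, h.1]
          · intro z hz
            simp only [List.foldl_cons, hp, if_pos, hlt] at hz
            obtain ⟨hmem, hacc, hall⟩ := h.2 z hz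
            have hzfa : z ≤ f a := by
              rcases hmem with h1 | _
              · simp at h1; simp [h1]
              · exact hacc _ (by simp)
            refine ⟨?_, ?_, ?_⟩
            · rcases hmem with h1 | ⟨c, hc, hpc, rfl⟩
              · simp at h1; exact Or.inr ⟨a, by simp, hp, h1⟩
              · exact Or.inr ⟨c, by simp [hc], hpc, rfl⟩
            · intro c hc; simp at hc; subst hc
              exact (hzfa.trans_lt hlt).le
            · intro x hx hpx
              rcases List.mem_cons.mp hx with rfl | hx'
              · exact hzfa
              · exact hall _ hx' hpx
        · have h := ih (some b)
          constructor
          · simp [List.foldl_cons, hp, hlt, h.1]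
          · intro z hz
            simp only [List.foldl_cons, hp, if_pos, hlt, if_false] at hz
            obtain ⟨hmem, hacc, hall⟩ := h.2 z hz
            have hzb : z ≤ b := by
              rcases hmem with h1 | _
              · simp at h1; simp [h1]
              · exact hacc _ (by simp)
            refine ⟨?_, ?_, ?_⟩
            · rcases hmem with h1 | ⟨c, hc, hpc, rfl⟩
              · simp at h1; subst h1; exact Or.inl (by simp)
              · exact Or.inr ⟨c, by simp [hc], hpc, rfl⟩
            · intro c hc; simp at hc; subst hc; exact hzb
            · intro x hx hpx
              rcases List.mem_cons.mp hx with rfl | hx'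
              · exact hzb.trans (not_lt.mp hlt)
              · exact hall _ hx' hpx
    · have h := ih acc
      constructor
      · simp [List.foldl_cons, hp, h.1]
      · intro z hz
        simp only [List.foldl_cons, hp, if_false] at hz
        obtain ⟨hmem, hacc, hall⟩ := h.2 z hz
        refine ⟨?_, hacc, ?_⟩
        · rcases hmem with h1 | ⟨c, hc, hpc, rfl⟩
          · exact Or.inl h1
          · exact Or.inr ⟨c, by simp [hc], hpc, rfl⟩
        · intro x hx hpx
          rcases List.mem_cons.mp hx with rfl | hx'
          · simp [hpx] at hp
          · exact hall _ hx' hpx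

lemma pvRot_head (v : List Int) (k : Nat) (hk : k < v.length) :
    pvRot v k = v[k] :: (v.drop (k + 1) ++ v.take k) := by
  unfold pvRot
  rw [List.drop_eq_getElem_cons hk, List.cons_append]

lemma pvConsLt (a b : Int) (xs ys : List Int) (h : a < b) : (a :: xs) < (b :: ys) := by
  rw [List.cons_lt_cons_iff]; exact Or.inl h

lemma pvLeastRot_spec (v : List Int) (hv : v ≠ []) :
    pvLeastRot v ∈ pvRots v v.length ∧ ∀ y ∈ pvRots v v.length, pvLeastRot v ≤ y := by
  obtain ⟨m, hm⟩ : ∃ m, PySem.List.min? v (fun x => x) = some m := by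
    cases h : PySem.List.min? v (fun x => x) with
    | none => exact absurd ((PySem.List.min?_eq_none_iff v _).mp h) hv
    | some m => exact ⟨m, rfl⟩
  have hmmem : m ∈ v := PySem.List.min?_mem hm
  have hmmin : ∀ y ∈ v, m ≤ y := PySem.List.min?_isMin hm
  obtain ⟨k0, hk0, hvk0⟩ := List.mem_iff_getElem.mp hmmem
  -- the concrete fold
  have hspec := pvFoldCmin (fun ix : Int × Int => ix.2 = m)
      (fun ix => PySem.List.slice v (some ix.1) none ++ PySem.List.slice v none (some ix.1))
      (PySem.List.enumerate v 0) none
  set r := (PySem.List.enumerate v 0).foldl (fun best ix =>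
        if ix.2 = m then
          match best with
          | none => some (PySem.List.slice v (some ix.1) none ++ PySem.List.slice v none (some ix.1))
          | some b => if (PySem.List.slice v (some ix.1) none ++ PySem.List.slice v none (some ix.1)) < b then some (PySem.List.slice v (some ix.1) none ++ PySem.List.slice v none (some ix.1)) else some b
        else best) none with hrdef
  -- enumerate membership characterisation
  have henum : PySem.List.enumerate v 0 =
      (PySem.List.pyRange 0 (PySem.List.len v)).map (fun j => (j, PySem.List.pyGetD v j m)) :=
    PySem.List.enumerate_eq_map_pyRange v m
  have hmemchar : ∀ a : Int × Int, a ∈ PySem.List.enumerate v 0 →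
      ∃ k : Nat, ∃ hk : k < v.length, a = ((k : Int), v[k]) := by
    intro a ha
    rw [henum, List.mem_map] at ha
    obtain ⟨j, hj, rfl⟩ := ha
    rw [PySem.List.mem_pyRange_one] at hj
    simp only [PySem.List.len_eq] at hj
    refine ⟨j.toNat, by omega, ?_⟩
    rw [PySem.List.pyGetD_eq_getElem v m hj.1 (by simpa using hj.2)]
    rw [Int.toNat_of_nonneg hj.1]
  -- the witness pair is enumerated
  have hwit : (((k0 : Int)), v[k0]) ∈ PySem.List.enumerate v 0 := by
    rw [henum, List.mem_map]
    refine ⟨(k0 : Int), ?_, ?_⟩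
    · rw [PySem.List.mem_pyRange_one]; simp; omega
    · rw [PySem.List.pyGetD_eq_getElem v m (by positivity) (by simpa using hk0)]
      simp
  -- r is some
  obtain ⟨z, hz⟩ : ∃ z, r = some z := by
    cases hr : r with
    | some z => exact ⟨z, rfl⟩
    | none =>
      have := hspec.1.mp hr
      have : (((k0 : Int)), v[k0]) ∈ (PySem.List.enumerate v 0).filter
          (fun ix => decide (ix.2 = m)) := by
        rw [List.mem_filter]
        exact ⟨hwit, by simpa using hvk0⟩
      simp [hspec.1.mp hr |>.2] at this
  obtain ⟨hmem, -, hall⟩ := hspec.2 z hz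
  have hzval : pvLeastRot v = z := by
    unfold pvLeastRot
    rw [hm]
    show r.getD [] = z
    rw [hz]
    rfl
  -- slices are drop/take
  have hslice : ∀ k : Nat, PySem.List.slice v (some ((k : Int))) none ++ PySem.List.slice v none (some ((k : Int))) = pvRot v k := by
    intro k
    rw [PySem.List.slice_from_natCast, PySem.List.slice_to_natCast]
    rfl
  -- z is a rotation with head m
  obtain ⟨kz, hkz, hkzm, hkzeq⟩ : ∃ k : Nat, ∃ hk : k < v.length, v[k] = m ∧ z = pvRot v k := by
    rcases hmem with h1 | ⟨a, ha, hpa, rfl⟩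
    · simp at h1
    · obtain ⟨k, hk, rfl⟩ := hmemchar a ha
      exact ⟨k, hk, by simpa using hpa, by rw [hslice]⟩
  rw [hzval]
  constructor
  · rw [hkzeq]; exact List.mem_map.mpr ⟨kz, List.mem_range.mpr hkz, rfl⟩
  · intro y hy
    obtain ⟨k, hk, rfl⟩ := List.mem_map.mp hy
    rw [List.mem_range] at hk
    by_cases hvk : v[k] = m
    · have : z ≤ PySem.List.slice v (some ((k : Int))) none ++ PySem.List.slice v none (some ((k : Int))) := by
        apply hall (((k : Int)), v[k])
        · rw [henum, List.mem_map]
          refine ⟨(k : Int), by rw [PySem.List.mem_pyRange_one]; simp; omega, ?_⟩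
          rw [PySem.List.pyGetD_eq_getElem v m (by positivity) (by simpa using hk)]
          simp
        · simpa using hvk
      rwa [hslice] at this
    · have hlt : m < v[k] := lt_of_le_of_ne (hmmin _ (List.getElem_mem hk)) (Ne.symm hvk)
      rw [hkzeq, pvRot_head v kz hkz, pvRot_head v k hk, hkzm]
      exact (pvConsLt _ _ _ _ hlt).le

lemma pvB_eq (part : List Int) :
    to_standard___py_alt part =
      (PySem.List.min? ((pvVariants part).map pvLeastRot) (fun x => x)).getD [] := by
  unfold to_standard___py_alt pvVariants
  simp only [PySem.List.slice?_none_none_neg_one, Option.getD_some]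

lemma pvVariant_length (part v : List Int) (hv : v ∈ pvVariants part) :
    v.length = part.length := by
  simp only [pvVariants, List.mem_cons] at hv
  rcases hv with rfl | rfl | rfl | rfl | h
  · rfl
  · simp
  · simp
  · simp
  · simp at h

lemma pvVariant_ne_nil (part v : List Int) (hp : part ≠ []) (hv : v ∈ pvVariants part) :
    v ≠ [] := by
  have := pvVariant_length part v hv
  intro h
  rw [h] at this
  simp at this
  exact hp (List.eq_nil_of_length_eq_zero this.symm)

lemma pvMain (part : List Int) (hp : part ≠ []) :
    to_standard___py part = to_standard___py_alt part := by
  rw [pvA_eq, pvB_eq]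
  have hN : 0 < part.length := List.length_pos_iff.mpr hp
  -- B's minimum
  obtain ⟨b, hb⟩ : ∃ b, PySem.List.min? ((pvVariants part).map pvLeastRot) (fun x => x) = some b := by
    cases h : PySem.List.min? ((pvVariants part).map pvLeastRot) (fun x => x) with
    | none => simp [PySem.List.min?_eq_none_iff, pvVariants] at h
    | some b => exact ⟨b, rfl⟩
  have hbmem := PySem.List.min?_mem hb
  have hbmin : ∀ y ∈ (pvVariants part).map pvLeastRot, b ≤ y := by
    have hinst : (fun (a b : List ℤ) => a.decidableLT b) = (LinearOrder.toDecidableLT (α := List ℤ)) :=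
      Subsingleton.elim _ _
    rw [hinst] at hb
    exact PySem.List.min?_isMin hb
  -- b is one of the candidates in pvR
  have hbR : b ∈ pvR part := by
    obtain ⟨v, hv, rfl⟩ := List.mem_map.mp hbmem
    have hvlen := pvVariant_length part v hv
    have hspec := pvLeastRot_spec v (pvVariant_ne_nil part v hp hv)
    exact List.mem_flatMap.mpr ⟨v, hv, hvlen ▸ hspec.1⟩
  -- A's minimum
  obtain ⟨a, ha⟩ : ∃ a, PySem.List.min? (pvR part) (fun x => x) = some a := by
    cases h : PySem.List.min? (pvR part) (fun x => x) with
    | none =>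
      rw [PySem.List.min?_eq_none_iff] at h
      exact absurd h (by
        intro hnil
        have : pvRot part 0 ∈ pvR part :=
          List.mem_flatMap.mpr ⟨part, by simp [pvVariants],
            List.mem_map.mpr ⟨0, List.mem_range.mpr hN, rfl⟩⟩
        simp [hnil] at this)
    | some a => exact ⟨a, rfl⟩
  have hamin : ∀ y ∈ pvR part, a ≤ y := by
    have hinst : (fun (a b : List ℤ) => a.decidableLT b) = (LinearOrder.toDecidableLT (α := List ℤ)) :=
      Subsingleton.elim _ _
    rw [hinst] at ha
    exact PySem.List.min?_isMin ha
  have hamem := PySem.List.min?_mem ha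
  rw [ha, hb]
  simp only [Option.getD_some]
  apply le_antisymm
  · exact hamin b hbR
  · -- b ≤ a : a is a rotation of some variant v; b ≤ pvLeastRot v ≤ a
    obtain ⟨v, hv, hav⟩ := List.mem_flatMap.mp hamem
    have hvlen := pvVariant_length part v hv
    have hspec := pvLeastRot_spec v (pvVariant_ne_nil part v hp hv)
    have h1 : b ≤ pvLeastRot v := hbmin _ (List.mem_map.mpr ⟨v, hv, rfl⟩)
    have h2 : pvLeastRot v ≤ a := hspec.2 a (hvlen ▸ hav)
    exact h1.trans h2

-- ===== VERDICT (by name: the statement is the Claim_ definition above) =====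
theorem to_standard___py_spec : Claim_equal_to_standard___py := by
  intro part _ hpre
  unfold Spec_to_standard___py
  exact pvMain part hpre
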